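-- pv_equiv track=rewrite | github.com/suesie/grpocredit | src/grpocredit/voi/stage2_semantic.py | cluster_sizes_from_labels
-- ===== SOURCE A (Python) =====
-- def cluster_sizes_from_labels(labels: list[int]) -> list[int]:
--     if not labels:
--         return []
--     k = max(labels) + 1
--     sizes = [0] * k
--     for lbl in labels:
--         sizes[lbl] += 1
--     return sizes
-- ===== SOURCE B (Python) =====
-- def cluster_sizes_from_labels(labels: list[int]) -> list[int]:
--     if not labels:
--         return []
--     ordered = sorted(labels)
--     n = len(ordered)
--     sizes = [0] * (ordered[-1] + 1)
--     i = 0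
--     while i < n:
--         j = i
--         while j < n and ordered[j] == ordered[i]:
--             j += 1
--         sizes[ordered[i]] += j - i
--         i = j
--     return sizes
-- ===== Notes on version B (the rewrite author's own statement) =====
-- stated objective: alternative
-- what changed: Replaced A's element-by-element positional scatter (sizes[lbl] += 1 per element) by sort-then-scan: sort the labels once, then walk the sorted list run by run and add each run's length to its label's slot with one positional write per distinct label (same Python list indexing, so behaviour on negative labels matches A exactly).
import Mathlib
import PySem

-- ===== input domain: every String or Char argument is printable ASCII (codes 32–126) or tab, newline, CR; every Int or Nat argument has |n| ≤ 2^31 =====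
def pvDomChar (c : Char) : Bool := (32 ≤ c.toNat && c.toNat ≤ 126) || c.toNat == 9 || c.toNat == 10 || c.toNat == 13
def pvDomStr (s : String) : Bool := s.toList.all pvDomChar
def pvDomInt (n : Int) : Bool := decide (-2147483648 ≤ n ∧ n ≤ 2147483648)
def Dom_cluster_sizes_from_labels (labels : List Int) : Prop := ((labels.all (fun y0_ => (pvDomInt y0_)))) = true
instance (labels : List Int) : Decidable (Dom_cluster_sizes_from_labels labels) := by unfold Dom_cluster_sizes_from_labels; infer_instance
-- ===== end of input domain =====

-- B replaces A's element-by-element scatter (sizes[lbl] += 1 per element) by sort-then-scan: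
-- sort the labels once, then walk the sorted list run by run and add each run's length to
-- its label's slot with a single positional write per distinct label; same return value
-- (and the same Python list indexing, so the same behaviour on negative labels) as A.


-- ===== PORT A =====
-- 'if not labels: return []'; k = max(labels)+1; sizes = [0]*k; 'sizes[lbl] += 1' uses
-- Python indexing (a negative in-range index wraps); the IndexError cases are excluded by
-- Pre_ below, so the loop body is ported with the total forms pyGetD/pySetD (exact in range).
def cluster_sizes_from_labels (labels : List Int) : List Int :=
  match PySem.List.max? labels (fun x => x) with
  | none => []          -- labels == []
  | some m =>
    let k : Int := m + 1
    let sizes : List Int := List.replicate k.toNat 0    -- [0] * k  ([] when k ≤ 0)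
    labels.foldl (fun s lbl => PySem.List.pySetD s lbl (PySem.List.pyGetD s lbl 0 + 1)) sizes

-- ===== PORT B =====
-- inner 'while j < n and ordered[j] == ordered[i]: j += 1' — fuel (initially n - j) only
-- makes the loop total; guard order and steps are the Python ones.
def advanceEq (ordered : List Int) (b : Int) : Nat → Nat → Nat
  | j, 0 => j
  | j, fuel+1 => if h : j < ordered.length then
      (if ordered[j] = b then advanceEq ordered b (j+1) fuel else j)
    else j

-- outer 'while i < n: … sizes[ordered[i]] += j - i; i = j' — fuel (initially n) only makes
-- the loop total; 'sizes[ordered[i]] += j - i' keeps Python's indexing via pyGetD/pySetD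
-- (exact in range; the IndexError cases are outside Pre_ below, same as for A).
def runScatter (ordered : List Int) : Nat → Nat → List Int → List Int
  | _, 0, sizes => sizes
  | i, fuel+1, sizes =>
    if h : i < ordered.length then
      let j := advanceEq ordered ordered[i] i (ordered.length - i)
      runScatter ordered j fuel
        (PySem.List.pySetD sizes ordered[i]
          (PySem.List.pyGetD sizes ordered[i] 0 + ((j : Int) - (i : Int))))
    else sizes

-- ordered = sorted(labels); sizes = [0] * (ordered[-1] + 1); run-length scan as above.
def cluster_sizes_from_labels_alt (labels : List Int) : List Int :=
  if labels = [] then []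
  else
    let ordered := PySem.List.sorted labels (fun x => x) false
    let n := ordered.length
    let sizes : List Int := List.replicate (PySem.List.pyGetD ordered (-1) 0 + 1).toNat 0
    runScatter ordered 0 n sizes

-- ===== PRECONDITION & SPEC =====
-- Pre_ is exactly A's non-raising domain: empty, or every label ≥ -(max(labels)+1)
-- (equivalently: for every x some y has x + y + 1 ≥ 0); outside it A raises IndexError.
def Pre_cluster_sizes_from_labels (labels : List Int) : Prop :=
  labels = [] ∨ ∀ x ∈ labels, ∃ y ∈ labels, 0 ≤ x + y + 1
instance (labels : List Int) : Decidable (Pre_cluster_sizes_from_labels labels) := by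
  unfold Pre_cluster_sizes_from_labels; infer_instance
def pvWitness_cluster_sizes_from_labels : List Int := [1, 0, 1, 2]

def Spec_cluster_sizes_from_labels (labels : List Int) (out : List Int) : Prop := out = cluster_sizes_from_labels_alt labels
instance (labels : List Int) (out : List Int) : Decidable (Spec_cluster_sizes_from_labels labels out) := by
  unfold Spec_cluster_sizes_from_labels; infer_instance

-- ===== CLAIM (what is proved, stated in full; the proofs are below) =====
def Claim_equal_cluster_sizes_from_labels : Prop := ∀ (labels : List Int), Dom_cluster_sizes_from_labels labels → Pre_cluster_sizes_from_labels labels → Spec_cluster_sizes_from_labels labels (cluster_sizes_from_labels labels)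

-- ===== LEMMAS AND PROOFS =====

-- Python's normalised index for an in-range i (wraps negatives), as PySem.List.pyIdx? returns it.
def wrapIdx (n : Nat) (i : Int) : Nat := if 0 ≤ i then i.toNat else n - (-i).toNat

theorem pySetD_in (xs : List Int) (i : Int) (v : Int)
    (h1 : -(xs.length : Int) ≤ i) (_h2 : i < xs.length) :
    PySem.List.pySetD xs i v = xs.set (wrapIdx xs.length i) v := by
  simp only [PySem.List.pySetD, PySem.List.pySet?, PySem.List.pyIdx?, wrapIdx]
  split_ifs with h <;> simp_all

theorem pyGetD_in (xs : List Int) (i : Int) (d : Int)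
    (_h1 : -(xs.length : Int) ≤ i) (h2 : i < xs.length) :
    PySem.List.pyGetD xs i d = xs.getD (wrapIdx xs.length i) d := by
  by_cases h : 0 ≤ i
  · rw [PySem.List.pyGetD_of_nonneg xs d h]; simp [wrapIdx, h]
  · have hk : 0 < (-i).toNat ∧ (-i).toNat ≤ xs.length := by omega
    have : i = -(((-i).toNat : Nat) : Int) := by omega
    have hw : wrapIdx xs.length i = xs.length - (-i).toNat := by simp [wrapIdx, h]
    have hlt : wrapIdx xs.length i < xs.length := by omega
    rw [List.getD_eq_getElem _ _ hlt]
    conv_lhs => rw [this]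
    rw [PySem.List.pyGetD_neg_natCast xs (-i).toNat d hk.1 hk.2]
    congr 1
    omega

theorem wrapIdx_lt (n : Nat) (i : Int) (h1 : -(n : Int) ≤ i) (h2 : i < n) (hn : 0 < n) :
    wrapIdx n i < n := by
  unfold wrapIdx; split_ifs <;> omega

-- A's scatter loop: length is preserved …
theorem scatter_length (xs : List Int) (s : List Int) :
    (xs.foldl (fun s l => PySem.List.pySetD s l (PySem.List.pyGetD s l 0 + 1)) s).length
      = s.length := by
  induction xs generalizing s with
  | nil => rfl
  | cons x t ih => simp [List.foldl, ih, PySem.List.length_pySetD]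

-- … and entry j ends as its start value plus the number of xs-elements that wrap to j.
theorem scatter_getD (xs : List Int) (s : List Int)
    (h : ∀ x ∈ xs, -(s.length : Int) ≤ x ∧ x < (s.length : Int)) (j : Nat) (hj : j < s.length) :
    (xs.foldl (fun s l => PySem.List.pySetD s l (PySem.List.pyGetD s l 0 + 1)) s).getD j 0
      = s.getD j 0 + ((xs.countP (fun l => wrapIdx s.length l == j) : Nat) : Int) := by
  induction xs generalizing s with
  | nil => simp
  | cons x t ih =>
    obtain ⟨hx0, hxlt⟩ := h x (by simp)
    have hw : wrapIdx s.length x < s.length := wrapIdx_lt _ _ hx0 hxlt (by omega)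
    have hstep : PySem.List.pySetD s x (PySem.List.pyGetD s x 0 + 1)
        = s.set (wrapIdx s.length x) (s.getD (wrapIdx s.length x) 0 + 1) := by
      rw [pySetD_in s x _ hx0 hxlt, pyGetD_in s x 0 hx0 hxlt]
    rw [List.foldl_cons, hstep,
      ih _ (fun q hq => by simpa [List.length_set] using h q (List.mem_cons_of_mem _ hq))
        (by simpa [List.length_set] using hj)]
    rw [List.countP_cons]
    simp only [List.length_set]
    by_cases hc : wrapIdx s.length x = j
    · have hb : (wrapIdx s.length x == j) = true := by simp [hc]
      have hset : (s.set (wrapIdx s.length x) (s.getD (wrapIdx s.length x) 0 + 1)).getD j 0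
          = s.getD j 0 + 1 := by
        rw [← hc]; simp [List.getD_eq_getElem?_getD, hw]
      rw [hset, hb]
      push_cast
      simp
      ring
    · have hb : (wrapIdx s.length x == j) = false := by simp [hc]
      have hset : (s.set (wrapIdx s.length x) (s.getD (wrapIdx s.length x) 0 + 1)).getD j 0
          = s.getD j 0 := by
        rw [List.getD_eq_getElem?_getD, List.getElem?_set_ne hc, ← List.getD_eq_getElem?_getD]
      rw [hset, hb]
      simp

-- B's inner while loop advances exactly over the leading run of b's
theorem advanceEq_spec (s : List Int) (b : Int) (i fuel : Nat)
    (hf : s.length ≤ i + fuel) :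
    advanceEq s b i fuel = i + ((s.drop i).takeWhile (fun x => x == b)).length := by
  induction fuel generalizing i with
  | zero =>
    have : s.drop i = [] := List.drop_eq_nil_of_le (by omega)
    simp [advanceEq, this]
  | succ f ih =>
    unfold advanceEq
    split
    · next hi =>
      rw [List.drop_eq_getElem_cons hi, List.takeWhile_cons]
      by_cases hb : s[i] = b
      · rw [ih (i+1) (by omega)]
        simp [hb]
        omega
      · simp [hb]
    · next hi =>
      have : s.drop i = [] := List.drop_eq_nil_of_le (by omega)
      simp [this]

-- in a sorted list bounded below by b, the leading run of b's is all of the b's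
theorem takeWhile_len_eq_count (l : List Int) (hs : l.Pairwise (· ≤ ·)) (b : Int)
    (h : ∀ x ∈ l, b ≤ x) : (l.takeWhile (fun x => x == b)).length = l.count b := by
  induction l with
  | nil => rfl
  | cons a t ih =>
    rw [List.takeWhile_cons, List.count_cons]
    by_cases hb : a = b
    · have hbeq : (a == b) = true := by simp [hb]
      simp only [hbeq, if_true, List.length_cons]
      rw [ih hs.of_cons (fun x hx => h x (List.mem_cons_of_mem _ hx))]
    · have hgt : b < a := by have := h a (by simp); omega
      have hbeq : (a == b) = false := by simp [hb]
      have ht0 : t.count b = 0 := by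
        rw [List.count_eq_zero]
        intro hmem
        have := List.rel_of_pairwise_cons hs hmem
        omega
      simp [hbeq, ht0]

-- B's outer loop: length is preserved …
theorem runScatter_length (ordered : List Int) (fuel i : Nat) (sizes : List Int) :
    (runScatter ordered i fuel sizes).length = sizes.length := by
  induction fuel generalizing i sizes with
  | zero => rfl
  | succ f ih =>
    unfold runScatter
    split
    · rw [ih]
      simp [PySem.List.length_pySetD]
    · rfl

-- … and entry j ends as its start value plus the number of remaining elements that wrap to j.
theorem runScatter_getD (ordered : List Int) (hpw : ordered.Pairwise (· ≤ ·))
    (fuel : Nat) : ∀ (i : Nat) (sizes : List Int), ordered.length ≤ i + fuel →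
    (∀ x ∈ ordered.drop i, -(sizes.length : Int) ≤ x ∧ x < (sizes.length : Int)) →
    ∀ j, j < sizes.length →
    (runScatter ordered i fuel sizes).getD j 0
      = sizes.getD j 0
        + (((ordered.drop i).countP (fun l => wrapIdx sizes.length l == j) : Nat) : Int) := by
  induction fuel with
  | zero =>
    intro i sizes hf _ j _
    have : ordered.drop i = [] := List.drop_eq_nil_of_le (by omega)
    simp [runScatter, this]
  | succ f ih =>
    intro i sizes hf hb j hj
    unfold runScatter
    split
    · next hi =>
      have hcons : ordered.drop i = ordered[i] :: ordered.drop (i+1) :=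
        List.drop_eq_getElem_cons hi
      obtain ⟨ha0, halt⟩ := hb ordered[i] (by rw [hcons]; exact List.mem_cons_self)
      have hwlt : wrapIdx sizes.length ordered[i] < sizes.length :=
        wrapIdx_lt _ _ ha0 halt (by omega)
      have hjj : advanceEq ordered ordered[i] i (ordered.length - i)
          = i + ((ordered.drop i).takeWhile (fun x => x == ordered[i])).length :=
        advanceEq_spec ordered ordered[i] i _ (by omega)
      set tw := ((ordered.drop i).takeWhile (fun x => x == ordered[i])).length with htw
      have htw1 : 1 ≤ tw := by
        rw [htw, hcons, List.takeWhile_cons]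
        simp
      have hpwd : (ordered.drop i).Pairwise (· ≤ ·) := hpw.drop
      have hlow : ∀ x ∈ ordered.drop i, ordered[i] ≤ x := by
        rw [hcons]
        intro x hx
        rcases List.mem_cons.mp hx with rfl | hx
        · exact le_refl _
        · exact List.rel_of_pairwise_cons (hcons ▸ hpwd) hx
      have htwc : tw = (ordered.drop i).count ordered[i] :=
        takeWhile_len_eq_count _ hpwd _ hlow
      have htwle : tw ≤ (ordered.drop i).length := by
        rw [htw]; exact (List.takeWhile_prefix _).length_le
      have hdd : ordered.drop (i + tw) = (ordered.drop i).drop tw := by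
        rw [List.drop_drop]
      have hdw : ordered.drop (i + tw)
          = (ordered.drop i).dropWhile (fun x => x == ordered[i]) := by
        rw [hdd]
        conv_lhs =>
          rw [← List.takeWhile_append_dropWhile (p := fun x => x == ordered[i])
            (l := ordered.drop i)]
        rw [htw]
        exact List.drop_left
      have hstep : PySem.List.pySetD sizes ordered[i]
            (PySem.List.pyGetD sizes ordered[i] 0
              + (((i + tw : Nat) : Int) - (i : Int)))
          = sizes.set (wrapIdx sizes.length ordered[i])
              (sizes.getD (wrapIdx sizes.length ordered[i]) 0
                + (((i + tw : Nat) : Int) - (i : Int))) := by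
        rw [pySetD_in sizes _ _ ha0 halt, pyGetD_in sizes _ 0 ha0 halt]
      simp only [hjj]
      show (runScatter ordered (i + tw) f
          (PySem.List.pySetD sizes ordered[i]
            (PySem.List.pyGetD sizes ordered[i] 0 + (((i + tw : Nat) : Int) - (i : Int))))).getD j 0
        = _
      rw [hstep, ih (i + tw) _ (by omega)
        (fun x hx => by
          simpa [List.length_set] using
            hb x (by
              rw [hdd] at hx
              exact List.mem_of_mem_drop hx))
        j (by simpa [List.length_set] using hj)]
      simp only [List.length_set]
      -- split the remaining elements into the leading run and the rest
      have hsplit : (ordered.drop i).countP (fun l => wrapIdx sizes.length l == j)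
          = ((ordered.drop i).takeWhile (fun x => x == ordered[i])).countP
              (fun l => wrapIdx sizes.length l == j)
            + (ordered.drop (i + tw)).countP (fun l => wrapIdx sizes.length l == j) := by
        rw [hdw]
        conv_lhs =>
          rw [← List.takeWhile_append_dropWhile (p := fun x => x == ordered[i])
            (l := ordered.drop i)]
        rw [List.countP_append]
      have hrun : ((ordered.drop i).takeWhile (fun x => x == ordered[i])).countP
            (fun l => wrapIdx sizes.length l == j)
          = if wrapIdx sizes.length ordered[i] = j then tw else 0 := by
        have hconst : ∀ x ∈ (ordered.drop i).takeWhile (fun x => x == ordered[i]),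
            x = ordered[i] := by
          intro x hx
          have := List.mem_takeWhile_imp hx
          simpa using this
        have hrepl : (ordered.drop i).takeWhile (fun x => x == ordered[i])
            = List.replicate tw ordered[i] := by
          rw [htw]
          exact List.eq_replicate_of_mem hconst
        rw [hrepl, List.countP_replicate]
        by_cases hc : wrapIdx sizes.length ordered[i] = j <;> simp [hc]
      rw [hsplit, hrun]
      by_cases hc : wrapIdx sizes.length ordered[i] = j
      · have hset : (sizes.set (wrapIdx sizes.length ordered[i])
              (sizes.getD (wrapIdx sizes.length ordered[i]) 0
                + (((i + tw : Nat) : Int) - (i : Int)))).getD j 0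
            = sizes.getD j 0 + (((i + tw : Nat) : Int) - (i : Int)) := by
          rw [← hc]
          simp [List.getD_eq_getElem?_getD, hwlt]
        rw [hset, if_pos hc]
        push_cast
        ring
      · have hset : (sizes.set (wrapIdx sizes.length ordered[i])
              (sizes.getD (wrapIdx sizes.length ordered[i]) 0
                + (((i + tw : Nat) : Int) - (i : Int)))).getD j 0
            = sizes.getD j 0 := by
          rw [List.getD_eq_getElem?_getD, List.getElem?_set_ne hc,
            ← List.getD_eq_getElem?_getD]
        rw [hset, if_neg hc]
        simp
    · next hi =>
      have : ordered.drop i = [] := List.drop_eq_nil_of_le (by omega)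
      simp [this]

theorem ports_agree (labels : List Int)
    (hPre : Pre_cluster_sizes_from_labels labels) :
    cluster_sizes_from_labels labels = cluster_sizes_from_labels_alt labels := by
  by_cases hnil : labels = []
  · subst hnil; rfl
  · obtain ⟨m, hm⟩ : ∃ m, PySem.List.max? labels (fun x => x) = some m := by
      cases hmx : PySem.List.max? labels (fun x => x) with
      | none => exact absurd ((PySem.List.max?_eq_none_iff _ _).mp hmx) hnil
      | some m => exact ⟨m, rfl⟩
    have hmax : ∀ y ∈ labels, y ≤ m := by
      intro y hy; simpa using PySem.List.max?_isMax hm y hy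
    have hmem : m ∈ labels := PySem.List.max?_mem hm
    have hP : ∀ x ∈ labels, ∃ y ∈ labels, 0 ≤ x + y + 1 :=
      hPre.resolve_left hnil
    have hm0 : 0 ≤ m := by
      obtain ⟨y, hy, hxy⟩ := hP m hmem
      have := hmax y hy; omega
    have hlow : ∀ x ∈ labels, -(m + 1) ≤ x := by
      intro x hx
      obtain ⟨y, hy, hxy⟩ := hP x hx
      have := hmax y hy; omega
    set ordered := PySem.List.sorted labels (fun x => x) false with hord
    have hperm : ordered.Perm labels := PySem.List.sorted_perm ..
    have hpw : ordered.Pairwise (· ≤ ·) := by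
      simpa using PySem.List.sorted_pairwise labels (fun x => x)
    have hone : ordered ≠ [] := by
      rw [hord, Ne, PySem.List.sorted_eq_nil_iff]; exact hnil
    have hlenpos : 0 < ordered.length := List.length_pos_iff.mpr hone
    have hlast : PySem.List.pyGetD ordered (-1) (0 : Int) = ordered.getLast hone :=
      PySem.List.pyGetD_neg_one ..
    have hlast_m : ordered.getLast hone = m := by
      apply le_antisymm
      · exact hmax _ (hperm.mem_iff.mp (List.getLast_mem hone))
      · obtain ⟨p, hp, hpe⟩ := List.mem_iff_getElem.mp (hperm.mem_iff.mpr hmem)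
        rw [List.getLast_eq_getElem]
        calc m = ordered[p] := hpe.symm
          _ ≤ ordered[ordered.length - 1] := by
              have := PySem.List.sorted_id_getElem_mono (xs := labels)
                (p := p) (q := ordered.length - 1) (by omega)
                (by rw [← hord]; omega)
              simpa [← hord] using this
    set K : Nat := (m + 1).toNat with hKdef
    have hK : (K : Int) = m + 1 := by omega
    have hbl : ∀ x ∈ labels,
        -((List.replicate K (0 : Int)).length : Int) ≤ x
          ∧ x < ((List.replicate K (0 : Int)).length : Int) := by
      intro x hx
      simp only [List.length_replicate, hK]
      exact ⟨hlow x hx, by have := hmax x hx; omega⟩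
    have hB : cluster_sizes_from_labels_alt labels
        = runScatter ordered 0 ordered.length (List.replicate K (0 : Int)) := by
      unfold cluster_sizes_from_labels_alt
      rw [if_neg hnil]
      simp only [← hord, hlast, hlast_m, ← hKdef]
    rw [hB]
    unfold cluster_sizes_from_labels
    rw [hm]
    apply List.ext_getElem
    · rw [scatter_length, runScatter_length]
    · intro j h1 h2
      have hjK : j < (List.replicate K (0 : Int)).length := by
        rw [scatter_length] at h1
        simp only [List.length_replicate] at h1 ⊢
        omega
      rw [← List.getD_eq_getElem _ 0 h1, ← List.getD_eq_getElem _ 0 h2,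
        scatter_getD labels _ hbl j hjK,
        runScatter_getD ordered hpw ordered.length 0 _ (by omega)
          (fun x hx => hbl x (hperm.mem_iff.mp (by simpa using hx))) j hjK]
      rw [List.drop_zero]
      congr 2
      exact (hperm.countP_eq _).symm

-- ===== VERDICT (by name: the statement is the Claim_ definition above) =====
theorem cluster_sizes_from_labels_spec : Claim_equal_cluster_sizes_from_labels := by
  intro labels _ hPre
  exact ports_agree labels hPre
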